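-- pv_equiv track=rewrite | github.com/Iniquitatis/sd-webui-temporal | temporal/utils/collection.py | get_next_element
-- ===== SOURCE A (Python) =====
-- from collections.abc import Iterable
-- from typing import Callable, Iterator, Optional, TypeVar
--
-- T = TypeVar("T")
--
-- U = TypeVar("U")
--
-- def get_next_element(iterable: Iterable[T], current: T, fallback: U = None) -> T | U:
--     iterator = iter(iterable)
--
--     while True:
--         try:
--             item = next(iterator)
--         except StopIteration:
--             return fallback
--
--         if item == current:
--             break
--
--     try:
--         return next(iterator)
--     except StopIteration:
--         return fallback
-- ===== SOURCE B (Python) =====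
-- def get_next_element(iterable, current, fallback=None):
--     items = list(iterable)
--     succ = {}
--     for a, b in zip(items, items[1:]):
--         succ.setdefault(a, b)
--     return succ.get(current, fallback)
-- ===== Notes on version B (the rewrite author's own statement) =====
-- stated objective: alternative
-- what changed: Instead of A's scan-for-current-then-fetch-next iterator loop, B builds a first-occurrence successor map from zipped adjacent pairs (setdefault keeps the successor of the first occurrence) and answers with a single dictionary lookup.
import Mathlib
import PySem

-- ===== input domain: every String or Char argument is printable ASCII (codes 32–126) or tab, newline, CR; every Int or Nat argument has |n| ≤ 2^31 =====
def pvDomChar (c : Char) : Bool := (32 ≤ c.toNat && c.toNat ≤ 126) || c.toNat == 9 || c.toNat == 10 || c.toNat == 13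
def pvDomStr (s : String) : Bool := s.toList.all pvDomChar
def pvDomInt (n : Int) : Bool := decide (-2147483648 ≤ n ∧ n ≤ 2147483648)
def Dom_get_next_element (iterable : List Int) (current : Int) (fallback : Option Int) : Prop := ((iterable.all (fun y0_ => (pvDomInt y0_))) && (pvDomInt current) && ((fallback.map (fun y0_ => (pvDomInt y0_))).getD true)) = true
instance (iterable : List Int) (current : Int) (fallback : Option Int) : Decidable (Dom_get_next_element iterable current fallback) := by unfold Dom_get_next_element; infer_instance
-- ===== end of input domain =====

-- B replaces A's find-then-fetch iterator loop by a first-occurrence successor map built from zipped adjacent pairs, answered by one lookup (alternative decomposition; same cost).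


-- ===== PORT A =====
-- A: scan for the first item equal to current; on match return the following item (fallback if the iterator is exhausted either time).
def get_next_element (iterable : List Int) (current : Int) (fallback : Option Int) : Option Int :=
  match iterable with
  | [] => fallback
  | item :: rest =>
    if item = current then
      match rest with
      | [] => fallback
      | nxt :: _ => some nxt
    else get_next_element rest current fallback

-- ===== PORT B =====
-- B: build succ = {a: b for first occurrence of a} over zip(items, items[1:]) via setdefault, then succ.get(current, fallback).
def get_next_element_alt (iterable : List Int) (current : Int) (fallback : Option Int) : Option Int :=
  let succ := (List.zip iterable (iterable.drop 1)).foldl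
    (fun d p => PySem.Dict.setdefault d p.1 p.2) (PySem.Dict.empty)
  match PySem.Dict.get? succ current with
  | some v => some v
  | none => fallback

-- ===== PRECONDITION & SPEC =====
def Spec_get_next_element (iterable : List Int) (current : Int) (fallback : Option Int) (out : Option Int) : Prop := out = get_next_element_alt iterable current fallback
instance (iterable : List Int) (current : Int) (fallback : Option Int) (out : Option Int) : Decidable (Spec_get_next_element iterable current fallback out) := by unfold Spec_get_next_element; infer_instance

-- ===== CLAIM (what is proved, stated in full; the proofs are below) =====
def Claim_equal_get_next_element : Prop := ∀ (iterable : List Int) (current : Int) (fallback : Option Int), Dom_get_next_element iterable current fallback → Spec_get_next_element iterable current fallback (get_next_element iterable current fallback)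

-- ===== LEMMAS AND PROOFS =====

-- the successor map built with setdefault answers with the second component of the FIRST matching pair
lemma get?_fold_setdefault (ps : List (Int × Int)) (d : PySem.Dict Int Int) (k : Int) :
    (ps.foldl (fun d p => PySem.Dict.setdefault d p.1 p.2) d).get? k
      = (d.get? k).or ((ps.find? (fun p => p.1 == k)).map Prod.snd) := by
  induction ps generalizing d with
  | nil => simp
  | cons p rest ih =>
    simp only [List.foldl_cons, ih]
    by_cases h : p.1 = k
    · subst h
      rw [PySem.Dict.get?_setdefault_self]
      rw [List.find?_cons_of_pos (by simp)]
      cases hd : d.get? p.1 <;> simp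
    · rw [PySem.Dict.get?_setdefault_of_ne d p.2 (fun he => h he.symm)]
      rw [List.find?_cons_of_neg (by simp [h])]

-- A computes the second component of the first adjacent pair whose head equals current
lemma a_eq_find (iterable : List Int) (current : Int) (fallback : Option Int) :
    get_next_element iterable current fallback
      = match ((List.zip iterable (iterable.drop 1)).find? (fun p => p.1 == current)).map Prod.snd with
        | some v => some v
        | none => fallback := by
  induction iterable with
  | nil => rfl
  | cons x xs ih =>
    cases xs with
    | nil =>
      by_cases hx : x = current <;> simp [get_next_element, hx]
    | cons y ys =>
      rw [get_next_element]
      simp only [List.drop_one, List.tail_cons, List.zip_cons_cons]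
      by_cases hx : x = current
      · subst hx
        rw [List.find?_cons_of_pos (by simp)]
        simp
      · rw [if_neg hx, ih, List.find?_cons_of_neg (by simp [hx])]
        simp only [List.drop_one, List.tail_cons]

-- ===== VERDICT (by name: the statement is the Claim_ definition above) =====
theorem get_next_element_spec : Claim_equal_get_next_element := by
  intro iterable current fallback _
  show get_next_element iterable current fallback = get_next_element_alt iterable current fallback
  rw [a_eq_find, get_next_element_alt]
  simp only [get?_fold_setdefault, PySem.Dict.get?_empty, Option.none_or]
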